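-- pv_equiv track=rewrite | github.com/rogpaxton/Miscellaneous-Projects | socialist_redistribution.py | socialist_distribution
-- ===== SOURCE A (Python) =====
-- def socialist_distribution(population, minimum):
--
--     reduced = []
--     for i in population:
--         reduced.append(i - minimum)
--     improved = []
--     addition = 0
--     for i in reduced:
--         if i < 0:
--             addition -= i
--             improved.append(0)
--         elif i == 0:
--             improved.append(0)
--         else:
--             improved.append(i)
--
--     normalized = []
--     for i in improved:
--         normalized.append(i + minimum)
--
--     for i in range(0,addition):
--         for index, j in enumerate(normalized):
--             if j == max(normalized):
--                 normalized[index] = j - 1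
--                 break
--
--     if sum(population) < (minimum * len(population)):
--         return []
--
--     return normalized
-- ===== SOURCE B (Python) =====
-- def socialist_distribution(population, minimum):
--     n = len(population)
--     if sum(population) < minimum * n:
--         return []
--     levels = [x if x > minimum else minimum for x in population]
--     k = sum(minimum - x for x in population if x < minimum)
--     if k == 0:
--         return levels
--     def removal(L):
--         return sum(v - L for v in levels if v > L)
--     lo, hi = minimum, max(levels)
--     while lo < hi:
--         mid = (lo + hi) // 2
--         if removal(mid) <= k:
--             hi = mid
--         else:
--             lo = mid + 1
--     L = lo
--     r = k - removal(L)
--     out = []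
--     for v in levels:
--         if v >= L:
--             if r > 0:
--                 out.append(L - 1)
--                 r -= 1
--             else:
--                 out.append(L)
--         else:
--             out.append(v)
--     return out
-- ===== Notes on version B (the rewrite author's own statement) =====
-- stated objective: faster
-- what changed: A simulates the redistribution by decrementing the current maximum one unit at a time (recomputing max over the list for each of the 'addition' units); B computes the final water-fill level directly with a binary search over levels and emits the result in one pass, giving the leftover decrements to the leftmost highest elements.
import Mathlib
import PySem

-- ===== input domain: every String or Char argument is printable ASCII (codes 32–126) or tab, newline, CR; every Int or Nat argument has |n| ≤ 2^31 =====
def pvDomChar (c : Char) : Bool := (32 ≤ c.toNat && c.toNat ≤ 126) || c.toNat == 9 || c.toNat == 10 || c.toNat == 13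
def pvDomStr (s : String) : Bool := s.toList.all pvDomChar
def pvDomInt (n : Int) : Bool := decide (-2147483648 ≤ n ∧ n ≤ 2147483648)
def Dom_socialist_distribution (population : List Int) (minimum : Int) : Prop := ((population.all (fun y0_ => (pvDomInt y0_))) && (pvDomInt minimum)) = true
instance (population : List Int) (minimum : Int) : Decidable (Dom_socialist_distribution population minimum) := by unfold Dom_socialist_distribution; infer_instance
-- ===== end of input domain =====

-- B replaces A's one-decrement-at-a-time loop (O(addition·n²)) by a direct water-fill:
-- a binary search finds the final level, the leftover decrements go to the leftmost
-- highest elements — same return value, computed without simulating the loop.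

-- ===== PORT A =====

-- Python's max(l); both Pythons call max only on nonempty lists (the 0 default is never reached there)
def pyMaxList (l : List Int) : Int :=
  match l with
  | [] => 0
  | x :: xs => xs.foldl max x

-- inner 'for index, j in enumerate(normalized): if j == max(normalized): …; break'
-- (the list is unchanged until the break, so max(normalized) is the fixed value m)
def stepAuxA (m : Int) : List Int → List Int
  | [] => []
  | x :: xs => if x = m then (x - 1) :: xs else x :: stepAuxA m xs

def stepA (l : List Int) : List Int := stepAuxA (pyMaxList l) l

def socialist_distribution (population : List Int) (minimum : Int) : List Int :=
  let reduced := population.foldl (fun acc i => acc ++ [i - minimum]) []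
  let st := reduced.foldl (fun (st : Int × List Int) i =>
      if i < 0 then (st.1 - i, st.2 ++ [(0 : Int)])
      else if i = 0 then (st.1, st.2 ++ [(0 : Int)])
      else (st.1, st.2 ++ [i])) ((0 : Int), ([] : List Int))
  let addition := st.1
  let improved := st.2
  let normalized := improved.foldl (fun acc i => acc ++ [i + minimum]) []
  -- 'for i in range(0, addition)': addition iterations of the decrement step
  let final := stepA^[addition.toNat] normalized
  if population.sum < minimum * (population.length : Int) then [] else final

-- ===== PORT B =====

-- sum(v - L for v in levels if v > L)
def removalB (levels : List Int) (L : Int) : Int :=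
  levels.foldl (fun s v => if v > L then s + (v - L) else s) 0

-- the while-loop binary search for the least L with removal(L) <= k
def bsearchB (levels : List Int) (k lo hi : Int) : Int :=
  if h : lo < hi then
    let mid := PySem.Int.floordiv (lo + hi) 2
    if removalB levels mid ≤ k then bsearchB levels k lo mid
    else bsearchB levels k (mid + 1) hi
  else lo
termination_by (hi - lo).toNat
decreasing_by
  all_goals
    have hb := PySem.Int.floordiv_two_mid_bounds (le_of_lt h)
    have hlt : PySem.Int.floordiv (lo + hi) 2 < hi :=
      (PySem.Int.floordiv_lt_iff_lt_mul (by omega)).mpr (by omega)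
    omega

-- the final 'for v in levels' append loop with the running budget r
def fillB (L : Int) : List Int → Int → List Int
  | [], _ => []
  | v :: vs, r =>
    if v ≥ L then
      if r > 0 then (L - 1) :: fillB L vs (r - 1) else L :: fillB L vs r
    else v :: fillB L vs r

def socialist_distribution_alt (population : List Int) (minimum : Int) : List Int :=
  if population.sum < minimum * (population.length : Int) then []
  else
    let levels := population.map (fun x => if x > minimum then x else minimum)
    let k := population.foldl (fun s x => if x < minimum then s + (minimum - x) else s) 0
    if k = 0 then levels
    else
      let L := bsearchB levels k minimum (pyMaxList levels)
      let r := k - removalB levels L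
      fillB L levels r

-- ===== PRECONDITION & SPEC =====
def Spec_socialist_distribution (population : List Int) (minimum : Int) (out : List Int) : Prop := out = socialist_distribution_alt population minimum
instance (population : List Int) (minimum : Int) (out : List Int) : Decidable (Spec_socialist_distribution population minimum out) := by unfold Spec_socialist_distribution; infer_instance

-- ===== CLAIM (what is proved, stated in full; the proofs are below) =====
def Claim_equal_socialist_distribution : Prop := ∀ (population : List Int) (minimum : Int), Dom_socialist_distribution population minimum → Spec_socialist_distribution population minimum (socialist_distribution population minimum)

-- ===== LEMMAS AND PROOFS =====

-- proof-side: number of elements of vs that are ≥ L (as an Int)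
def cntGeP (vs : List Int) (L : Int) : Int := (vs.countP (fun x => decide (L ≤ x)) : Int)

-- proof-side: one step of the (level, budget) state that tracks A's decrement loop
def gstepP (vs : List Int) (s : Int × Int) : Int × Int :=
  if s.2 + 1 < cntGeP vs s.1 then (s.1, s.2 + 1) else (s.1 - 1, 0)

lemma removal_foldl (L : Int) (vs : List Int) (init : Int) :
    vs.foldl (fun s v => if v > L then s + (v - L) else s) init
      = init + vs.foldl (fun s v => if v > L then s + (v - L) else s) 0 := by
  induction vs generalizing init with
  | nil => simp
  | cons v vs ih =>
    simp only [List.foldl]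
    rw [ih, ih (if v > L then 0 + (v - L) else 0)]
    split_ifs <;> omega

lemma removalB_nil (L : Int) : removalB [] L = 0 := rfl

lemma removalB_cons (v : Int) (vs : List Int) (L : Int) :
    removalB (v :: vs) L = (if L < v then v - L else 0) + removalB vs L := by
  simp only [removalB, List.foldl]
  rw [removal_foldl]
  split_ifs <;> omega

lemma removalB_antitone (vs : List Int) {L L' : Int} (h : L ≤ L') :
    removalB vs L' ≤ removalB vs L := by
  induction vs with
  | nil => simp [removalB_nil]
  | cons v vs ih => rw [removalB_cons, removalB_cons]; split_ifs <;> omega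

lemma cntGeP_nil (L : Int) : cntGeP [] L = 0 := rfl

lemma cntGeP_cons (v : Int) (vs : List Int) (L : Int) :
    cntGeP (v :: vs) L = (if L ≤ v then 1 else 0) + cntGeP vs L := by
  simp only [cntGeP, List.countP_cons]
  by_cases h : L ≤ v
  · simp [h]; omega
  · simp [h]

lemma cntGeP_nonneg (vs : List Int) (L : Int) : 0 ≤ cntGeP vs L := by
  simp only [cntGeP]; positivity

lemma cntGeP_antitone (vs : List Int) {L L' : Int} (h : L ≤ L') :
    cntGeP vs L' ≤ cntGeP vs L := by
  induction vs with
  | nil => simp [cntGeP_nil]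
  | cons v vs ih => rw [cntGeP_cons, cntGeP_cons]; split_ifs <;> omega

lemma removalB_pred (vs : List Int) (L : Int) :
    removalB vs (L - 1) = removalB vs L + cntGeP vs L := by
  induction vs with
  | nil => simp [removalB_nil, cntGeP_nil]
  | cons v vs ih =>
    rw [removalB_cons, removalB_cons, cntGeP_cons]
    split_ifs <;> omega

lemma removalB_of_all_le (vs : List Int) (L : Int) (h : ∀ x ∈ vs, x ≤ L) :
    removalB vs L = 0 := by
  induction vs with
  | nil => simp [removalB_nil]
  | cons v vs ih =>
    rw [removalB_cons]
    have hv := h v (by simp)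
    rw [if_neg (by omega), ih (fun x hx => h x (by simp [hx]))]
    simp

lemma level_unique (vs : List Int) {k L L' : Int}
    (h1 : removalB vs L ≤ k) (h2 : k < removalB vs (L - 1))
    (h1' : removalB vs L' ≤ k) (h2' : k < removalB vs (L' - 1)) : L = L' := by
  by_contra hne
  rcases lt_or_gt_of_ne hne with h | h
  · have := removalB_antitone vs (show L ≤ L' - 1 by omega)
    omega
  · have := removalB_antitone vs (show L' ≤ L - 1 by omega)
    omega

-- Python's max over a nonempty list: an element, and an upper bound
lemma pyMaxList_mem (x : Int) (xs : List Int) : pyMaxList (x :: xs) ∈ x :: xs := by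
  simp only [pyMaxList]
  rcases PySem.List.foldl_max_mem xs x with h | h
  · simp [h]
  · simp [h]

lemma le_pyMaxList (x : Int) (xs : List Int) : ∀ y ∈ x :: xs, y ≤ pyMaxList (x :: xs) := by
  intro y hy
  simp only [pyMaxList]
  rcases List.mem_cons.mp hy with rfl | hy
  · exact (PySem.List.le_foldl_max xs y).1
  · exact (PySem.List.le_foldl_max xs x).2 y hy

-- every element of a fill is ≤ the level
lemma fillB_le (L : Int) (vs : List Int) (r : Int) :
    ∀ y ∈ fillB L vs r, y ≤ L := by
  induction vs generalizing r with
  | nil => simp [fillB]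
  | cons v vs ih =>
    intro y hy
    simp only [fillB] at hy
    split_ifs at hy <;> rcases List.mem_cons.mp hy with rfl | hy <;>
      first | omega | exact ih _ _ hy

lemma fillB_mem (L : Int) (vs : List Int) (r : Int) (hr : 0 ≤ r) (hlt : r < cntGeP vs L) :
    L ∈ fillB L vs r := by
  induction vs generalizing r with
  | nil => rw [cntGeP_nil] at hlt; omega
  | cons v vs ih =>
    rw [cntGeP_cons] at hlt
    simp only [fillB]
    split_ifs with h1 h2
    · exact List.mem_cons_of_mem _
        (ih (r - 1) (by omega) (by rw [if_pos (show L ≤ v from h1)] at hlt; omega))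
    · simp
    · rw [if_neg (show ¬ L ≤ v from h1)] at hlt
      exact List.mem_cons_of_mem _ (ih r hr (by omega))

lemma pyMax_fillB (L : Int) (vs : List Int) (r : Int)
    (hr : 0 ≤ r) (hlt : r < cntGeP vs L) :
    pyMaxList (fillB L vs r) = L := by
  have hmem := fillB_mem L vs r hr hlt
  have hle := fillB_le L vs r
  cases hfill : fillB L vs r with
  | nil => rw [hfill] at hmem; simp at hmem
  | cons y ys =>
    rw [hfill] at hmem hle
    exact le_antisymm (hle _ (pyMaxList_mem y ys)) (le_pyMaxList y ys L hmem)

-- one decrement of the first maximal element advances the budget by one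
lemma stepAuxA_fillB (L : Int) (vs : List Int) (r : Int) (hr : 0 ≤ r) (hlt : r < cntGeP vs L) :
    stepAuxA L (fillB L vs r) = fillB L vs (r + 1) := by
  induction vs generalizing r with
  | nil => rw [cntGeP_nil] at hlt; omega
  | cons v vs ih =>
    rw [cntGeP_cons] at hlt
    by_cases h1 : v ≥ L
    · rw [if_pos (show L ≤ v from h1)] at hlt
      by_cases h2 : r > 0
      · simp only [fillB, if_pos h1, if_pos h2, if_pos (show r + 1 > 0 by omega)]
        simp only [stepAuxA, if_neg (show ¬(L - 1 = L) by omega)]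
        rw [ih (r - 1) (by omega) (by omega), show r - 1 + 1 = r + 1 - 1 by omega]
      · simp only [fillB, if_pos h1, if_neg h2, if_pos (show r + 1 > 0 by omega),
          show r + 1 - 1 = r by omega]
        simp [stepAuxA]
    · rw [if_neg (show ¬ L ≤ v from h1)] at hlt
      simp only [fillB, if_neg h1]
      simp only [stepAuxA, if_neg (show ¬(v = L) by omega)]
      rw [ih r hr (by omega)]

-- exhausting the budget at level L is the fresh budget-0 fill at level L - 1
lemma fillB_rollover (L : Int) (vs : List Int) :
    fillB L vs (cntGeP vs L) = fillB (L - 1) vs 0 := by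
  induction vs with
  | nil => simp [fillB]
  | cons v vs ih =>
    rw [cntGeP_cons]
    have hc := cntGeP_nonneg vs L
    by_cases h1 : v ≥ L
    · rw [if_pos (show L ≤ v from h1)]
      simp only [fillB, if_pos h1, if_pos (show (1 : Int) + cntGeP vs L > 0 by omega),
        if_pos (show v ≥ L - 1 by omega), if_neg (show ¬((0 : Int) > 0) by omega)]
      rw [show (1 : Int) + cntGeP vs L - 1 = cntGeP vs L by omega, ih]
    · rw [if_neg (show ¬ L ≤ v from h1)]
      by_cases h2 : v ≥ L - 1
      · -- v = L - 1: both sides keep the value L - 1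
        simp only [fillB, if_neg h1, if_pos h2, if_neg (show ¬((0 : Int) > 0) by omega)]
        rw [show (0 : Int) + cntGeP vs L = cntGeP vs L by omega, ih, show v = L - 1 by omega]
      · simp only [fillB, if_neg h1, if_neg h2]
        rw [show (0 : Int) + cntGeP vs L = cntGeP vs L by omega, ih]

lemma fillB_zero_of_le (L : Int) (vs : List Int) (h : ∀ x ∈ vs, x ≤ L) :
    fillB L vs 0 = vs := by
  induction vs with
  | nil => rfl
  | cons v vs ih =>
    have hv := h v (by simp)
    simp only [fillB, if_neg (show ¬((0 : Int) > 0) by omega)]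
    by_cases h1 : v ≥ L
    · rw [if_pos h1, ih (fun x hx => h x (by simp [hx]))]
      congr 1
      omega
    · rw [if_neg h1, ih (fun x hx => h x (by simp [hx]))]

-- A's decrement loop, tracked by the (level, budget) state machine
lemma iterA_fillB (x : Int) (xs : List Int) (j : Nat) :
    stepA^[j] (x :: xs)
        = fillB ((gstepP (x :: xs))^[j] (pyMaxList (x :: xs), 0)).1 (x :: xs)
            ((gstepP (x :: xs))^[j] (pyMaxList (x :: xs), 0)).2
    ∧ 0 ≤ ((gstepP (x :: xs))^[j] (pyMaxList (x :: xs), 0)).2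
    ∧ ((gstepP (x :: xs))^[j] (pyMaxList (x :: xs), 0)).2
        < cntGeP (x :: xs) ((gstepP (x :: xs))^[j] (pyMaxList (x :: xs), 0)).1
    ∧ removalB (x :: xs) ((gstepP (x :: xs))^[j] (pyMaxList (x :: xs), 0)).1
        + ((gstepP (x :: xs))^[j] (pyMaxList (x :: xs), 0)).2 = (j : Int) := by
  induction j with
  | zero =>
    refine ⟨?_, le_refl 0, ?_, ?_⟩
    · simp [fillB_zero_of_le _ _ (le_pyMaxList x xs)]
    · simp only [Function.iterate_zero, id]
      have hpos : 0 < (x :: xs).countP (fun y => decide (pyMaxList (x :: xs) ≤ y)) := by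
        rw [List.countP_pos_iff]
        exact ⟨pyMaxList (x :: xs), pyMaxList_mem x xs, by simp⟩
      simp only [cntGeP]
      exact_mod_cast hpos
    · simp [removalB_of_all_le _ _ (le_pyMaxList x xs)]
  | succ j ih =>
    obtain ⟨heq, hr0, hrlt, hsum⟩ := ih
    set s := (gstepP (x :: xs))^[j] (pyMaxList (x :: xs), 0) with hs
    have hstep : stepA (fillB s.1 (x :: xs) s.2) = fillB s.1 (x :: xs) (s.2 + 1) := by
      unfold stepA
      rw [pyMax_fillB s.1 (x :: xs) s.2 hr0 hrlt]
      exact stepAuxA_fillB s.1 (x :: xs) s.2 hr0 hrlt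
    rw [Function.iterate_succ_apply', Function.iterate_succ_apply', heq, hstep, ← hs]
    unfold gstepP
    split_ifs with hb
    · refine ⟨rfl, by dsimp only; omega, by dsimp only; omega, ?_⟩
      dsimp only
      push_cast
      omega
    · have hcnt : s.2 + 1 = cntGeP (x :: xs) s.1 := by omega
      have hmono := cntGeP_antitone (x :: xs) (show s.1 - 1 ≤ s.1 by omega)
      have hpred := removalB_pred (x :: xs) s.1
      refine ⟨?_, by dsimp only; omega, by dsimp only; omega, ?_⟩
      · dsimp only
        rw [hcnt, fillB_rollover]
      · dsimp only
        push_cast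
        omega

-- least level found by the binary search (fueled strong induction)
lemma bsearchB_spec_fuel (vs : List Int) (k : Int) : ∀ (n : Nat) (lo hi : Int),
    (hi - lo).toNat ≤ n → lo ≤ hi → removalB vs hi ≤ k → k < removalB vs (lo - 1) →
    removalB vs (bsearchB vs k lo hi) ≤ k ∧ k < removalB vs (bsearchB vs k lo hi - 1) := by
  intro n
  induction n with
  | zero =>
    intro lo hi hn hle hhi hlo
    have : lo = hi := by omega
    rw [bsearchB, dif_neg (by omega : ¬ lo < hi)]
    subst this
    exact ⟨hhi, hlo⟩
  | succ n ih =>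
    intro lo hi hn hle hhi hlo
    rw [bsearchB]
    by_cases h : lo < hi
    · rw [dif_pos h]
      have hb := PySem.Int.floordiv_two_mid_bounds (le_of_lt h)
      have hmidlt : PySem.Int.floordiv (lo + hi) 2 < hi :=
        (PySem.Int.floordiv_lt_iff_lt_mul (by omega)).mpr (by omega)
      by_cases hm : removalB vs (PySem.Int.floordiv (lo + hi) 2) ≤ k
      · rw [if_pos hm]
        exact ih lo _ (by omega) (by omega) hm hlo
      · rw [if_neg hm]
        refine ih _ hi (by omega) (by omega) hhi ?_
        rw [show PySem.Int.floordiv (lo + hi) 2 + 1 - 1 = PySem.Int.floordiv (lo + hi) 2 by omega]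
        omega
    · rw [dif_neg h]
      have : lo = hi := by omega
      subst this
      exact ⟨hhi, hlo⟩

lemma bsearchB_spec (vs : List Int) (k lo hi : Int) (hle : lo ≤ hi)
    (hhi : removalB vs hi ≤ k) (hlo : k < removalB vs (lo - 1)) :
    removalB vs (bsearchB vs k lo hi) ≤ k ∧ k < removalB vs (bsearchB vs k lo hi - 1) :=
  bsearchB_spec_fuel vs k (hi - lo).toNat lo hi (le_refl _) hle hhi hlo

-- A's appending pair loop over `reduced`: total deficit and the clamped list
lemma pairfold (l : List Int) (a : Int) (acc : List Int) :
    l.foldl (fun (st : Int × List Int) i =>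
        if i < 0 then (st.1 - i, st.2 ++ [(0 : Int)])
        else if i = 0 then (st.1, st.2 ++ [(0 : Int)])
        else (st.1, st.2 ++ [i])) (a, acc)
      = (a + (l.map (fun i => if i < 0 then -i else 0)).sum,
         acc ++ l.map (fun i => if i < 0 then (0 : Int) else if i = 0 then 0 else i)) := by
  induction l generalizing a acc with
  | nil => simp
  | cons i l ih =>
    simp only [List.foldl, List.map, List.sum_cons]
    split_ifs with h1 h2
    all_goals simp [ih, Prod.ext_iff, List.append_assoc]
    all_goals omega

-- B's deficit loop as a sum
lemma kfold (minimum : Int) (l : List Int) (init : Int) :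
    l.foldl (fun s x => if x < minimum then s + (minimum - x) else s) init
      = init + (l.map (fun x => if x < minimum then minimum - x else 0)).sum := by
  induction l generalizing init with
  | nil => simp
  | cons x l ih =>
    simp only [List.foldl, List.map, List.sum_cons]
    rw [ih]
    split_ifs <;> omega

-- surplus identity: removal at the minimum level vs the branch condition
lemma sum_ident (minimum : Int) (pop : List Int) :
    removalB (pop.map (fun x => if x > minimum then x else minimum)) minimum
      = pop.sum - minimum * (pop.length : Int)
        + (pop.map (fun x => if x < minimum then minimum - x else 0)).sum := by
  induction pop with
  | nil => simp [removalB_nil]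
  | cons x ps ih =>
    simp only [List.map, removalB_cons, List.sum_cons, List.length_cons]
    push_cast
    rw [mul_add, mul_one]
    split_ifs <;> omega

-- ===== VERDICT (by name: the statement is the Claim_ definition above) =====
theorem socialist_distribution_spec : Claim_equal_socialist_distribution := by
  intro pop minimum _
  unfold Spec_socialist_distribution socialist_distribution socialist_distribution_alt
  simp only [PySem.List.foldl_append_singleton_eq_map, List.nil_append, pairfold,
    List.map_map, zero_add, kfold]
  have hlev : pop.map ((fun i => i + minimum) ∘
        ((fun i => if i < 0 then (0 : Int) else if i = 0 then 0 else i) ∘ fun i => i - minimum))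
      = pop.map (fun x => if x > minimum then x else minimum) := by
    apply List.map_congr_left
    intro x _
    simp only [Function.comp]
    split_ifs <;> omega
  have hk : (pop.map ((fun i => if i < 0 then -i else (0 : Int)) ∘ fun i => i - minimum)).sum
      = (pop.map (fun x => if x < minimum then minimum - x else 0)).sum := by
    congr 1
    apply List.map_congr_left
    intro x _
    simp only [Function.comp]
    split_ifs <;> omega
  rw [hlev, hk]
  set kk := (pop.map (fun x => if x < minimum then minimum - x else 0)).sum with hkk
  set vs := pop.map (fun x => if x > minimum then x else minimum) with hvs
  by_cases hcond : pop.sum < minimum * (pop.length : Int)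
  · simp [hcond]
  · simp only [if_neg hcond]
    have hk0 : 0 ≤ kk := by
      rw [hkk]
      apply List.sum_nonneg
      intro x hx
      obtain ⟨y, _, rfl⟩ := List.mem_map.mp hx
      split_ifs <;> omega
    by_cases hkz : kk = 0
    · simp [hkz]
    · rw [if_neg hkz]
      have hne : vs ≠ [] := by
        intro h
        apply hkz
        have hpop : pop = [] := List.map_eq_nil_iff.mp (hvs ▸ h)
        rw [hkk, hpop]
        rfl
      obtain ⟨x0, xs0, hvs_cons⟩ := List.exists_cons_of_ne_nil hne
      -- facts about vs
      have hall_ge : ∀ y ∈ vs, minimum ≤ y := by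
        intro y hy
        rw [hvs] at hy
        obtain ⟨x, _, rfl⟩ := List.mem_map.mp hy
        split_ifs <;> omega
      have hmax_mem : pyMaxList vs ∈ vs := by rw [hvs_cons]; exact pyMaxList_mem x0 xs0
      have hmax_ub : ∀ y ∈ vs, y ≤ pyMaxList vs := by rw [hvs_cons]; exact le_pyMaxList x0 xs0
      have hlohi : minimum ≤ pyMaxList vs := hall_ge _ hmax_mem
      have hremmax : removalB vs (pyMaxList vs) = 0 := removalB_of_all_le _ _ hmax_ub
      have hlen : vs.length = pop.length := by rw [hvs]; simp
      have hlenpos : 0 < vs.length := by rw [hvs_cons]; simp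
      have hcnt_min : cntGeP vs minimum = (vs.length : Int) := by
        simp only [cntGeP]
        congr 1
        rw [List.countP_eq_length]
        intro y hy
        simpa using hall_ge y hy
      have hident := sum_ident minimum pop
      rw [← hvs, ← hkk] at hident
      have hremlo : kk < removalB vs (minimum - 1) := by
        rw [removalB_pred, hident, hcnt_min, hlen]
        omega
      have hbs := bsearchB_spec vs kk minimum (pyMaxList vs) hlohi (by omega) hremlo
      -- A's loop, through the state machine
      have hiter := iterA_fillB x0 xs0 kk.toNat
      rw [← hvs_cons] at hiter
      obtain ⟨heq, hr0, hrlt, hsum⟩ := hiter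
      rw [heq]
      set s := (gstepP vs)^[kk.toNat] (pyMaxList vs, 0) with hs
      have hksum : removalB vs s.1 + s.2 = kk := by omega
      have hpredA := removalB_pred vs s.1
      have hLeq : s.1 = bsearchB vs kk minimum (pyMaxList vs) :=
        level_unique vs (by omega) (by omega) hbs.1 hbs.2
      have hrem_eq : removalB vs s.1 = removalB vs (bsearchB vs kk minimum (pyMaxList vs)) := by
        rw [hLeq]
      rw [hLeq]
      congr 1
      omega
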